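-- pv_equiv track=rewrite | github.com/dhasane/config | scripts/ruta_mas_corta.py | minl
-- ===== SOURCE A (Python) =====
-- def minl( lista ):
--     primer = True
--     m = 0
--     pos = 0
--     for p, l in enumerate(lista):
--         if l is None:
--             continue
--
--         if primer:
--             m = l
--             pos = p
--             primer = False
--         elif l < m:
--             m = l
--             pos = p
--
--     return m, pos
-- ===== SOURCE B (Python) =====
-- def minl(lista):
--     orden = sorted(((l, p) for p, l in enumerate(lista) if l is not None),
--                    key=lambda c: c[0])
--     return orden[0] if orden else (0, 0)
-- ===== Notes on version B (the rewrite author's own statement) =====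
-- stated objective: alternative
-- what changed: Instead of a one-pass running-minimum loop with a first-element flag, B collects (value, index) pairs for the non-None elements and stably sorts them by value, returning the head of the sorted list (stability reproduces the first-occurrence tie-break) and the zero default pair when there are no candidates.
import Mathlib
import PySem

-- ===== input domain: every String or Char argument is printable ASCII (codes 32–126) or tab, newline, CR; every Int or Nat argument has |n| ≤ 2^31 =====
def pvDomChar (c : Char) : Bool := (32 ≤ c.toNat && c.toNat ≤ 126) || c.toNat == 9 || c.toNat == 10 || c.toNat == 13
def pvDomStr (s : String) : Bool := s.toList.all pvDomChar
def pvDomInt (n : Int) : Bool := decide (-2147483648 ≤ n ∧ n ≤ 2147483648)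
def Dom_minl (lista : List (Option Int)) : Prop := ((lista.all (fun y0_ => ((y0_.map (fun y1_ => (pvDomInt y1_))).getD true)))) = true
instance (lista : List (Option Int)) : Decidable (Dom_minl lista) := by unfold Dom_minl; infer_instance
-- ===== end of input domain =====

-- B replaces A's one-pass running-minimum loop by stably sorting the (value, index)
-- candidates by value and taking the head; alternative decomposition, same result.

-- ===== PORT A =====
-- state (primer, m, pos); fold over enumerate(lista), branches in A's order
def minl (lista : List (Option Int)) : Int × Int :=
  let st :=
    (PySem.List.enumerate lista).foldl
      (fun (st : Bool × Int × Int) pl =>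
        match pl.2 with
        | none => st
        | some l =>
          if st.1 then (false, l, pl.1)
          else if l < st.2.1 then (st.1, l, pl.1)
          else st)
      (true, 0, 0)
  (st.2.1, st.2.2)

-- ===== PORT B =====
def minl_alt (lista : List (Option Int)) : Int × Int :=
  let orden :=
    PySem.List.sorted
      ((PySem.List.enumerate lista).filterMap (fun pl => pl.2.map (fun l => (l, pl.1))))
      (fun c => c.1) false
  match orden with
  | [] => (0, 0)
  | c :: _ => c

-- ===== PRECONDITION & SPEC =====
def Spec_minl (lista : List (Option Int)) (out : Int × Int) : Prop := out = minl_alt lista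
instance (lista : List (Option Int)) (out : Int × Int) : Decidable (Spec_minl lista out) := by unfold Spec_minl; infer_instance

-- ===== CLAIM (what is proved, stated in full; the proofs are below) =====
def Claim_equal_minl : Prop := ∀ (lista : List (Option Int)), Dom_minl lista → Spec_minl lista (minl lista)

-- ===== LEMMAS AND PROOFS =====

-- A's loop body and the first-min accumulator shared by the proofs
def fA : (Bool × Int × Int) → (Int × Option Int) → (Bool × Int × Int) :=
  fun st pl =>
    match pl.2 with
    | none => st
    | some l =>
      if st.1 then (false, l, pl.1)
      else if l < st.2.1 then (st.1, l, pl.1)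
      else st

def stepM : Option (Int × Int) → (Int × Int) → Option (Int × Int) :=
  fun acc x =>
    match acc with
    | none => some x
    | some m => if x.1 < m.1 then some x else some m

def cands (xs : List (Option Int)) (s : Int) : List (Int × Int) :=
  (PySem.List.enumerate xs s).filterMap (fun pl => pl.2.map (fun l => (l, pl.1)))

theorem cands_cons (x : Option Int) (xs : List (Option Int)) (s : Int) :
    cands (x :: xs) s =
      (match x with
       | none => cands xs (s + 1)
       | some l => (l, s) :: cands xs (s + 1)) := by
  cases x <;> simp [cands, PySem.List.enumerate_cons]

theorem foldM_isSome (cs : List (Int × Int)) :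
    ∀ (a : Int × Int), ∃ c, cs.foldl stepM (some a) = some c := by
  induction cs with
  | nil => intro a; exact ⟨a, rfl⟩
  | cons x cs ih =>
    intro a
    simp only [List.foldl_cons, stepM]
    split <;> exact ih _

theorem foldA_false (xs : List (Option Int)) : ∀ (s m0 p0 : Int),
    (PySem.List.enumerate xs s).foldl fA (false, m0, p0) =
      (match (cands xs s).foldl stepM (some (m0, p0)) with
       | none => (false, m0, p0)
       | some c => (false, c.1, c.2)) := by
  induction xs with
  | nil => intro s m0 p0; simp [cands, PySem.List.enumerate_nil]
  | cons x xs ih =>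
    intro s m0 p0
    cases x with
    | none => simp [PySem.List.enumerate_cons, cands_cons, fA, ih]
    | some l =>
      simp only [PySem.List.enumerate_cons, List.foldl_cons, cands_cons]
      by_cases h : l < m0
      · have h1 : fA (false, m0, p0) (s, some l) = (false, l, s) := by simp [fA, h]
        have h2 : stepM (some (m0, p0)) (l, s) = some (l, s) := by simp [stepM, h]
        rw [h1, h2, ih]
        obtain ⟨c, hc⟩ := foldM_isSome (cands xs (s + 1)) (l, s)
        rw [hc]
      · have h1 : fA (false, m0, p0) (s, some l) = (false, m0, p0) := by simp [fA, h]
        have h2 : stepM (some (m0, p0)) (l, s) = some (m0, p0) := by simp [stepM, h]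
        rw [h1, h2, ih]

theorem foldA_true (xs : List (Option Int)) : ∀ (s m0 p0 : Int),
    (PySem.List.enumerate xs s).foldl fA (true, m0, p0) =
      (match (cands xs s).foldl stepM none with
       | none => (true, m0, p0)
       | some c => (false, c.1, c.2)) := by
  induction xs with
  | nil => intro s m0 p0; simp [cands, PySem.List.enumerate_nil]
  | cons x xs ih =>
    intro s m0 p0
    cases x with
    | none => simp [PySem.List.enumerate_cons, cands_cons, fA, ih]
    | some l =>
      simp only [PySem.List.enumerate_cons, List.foldl_cons, cands_cons]
      have h1 : fA (true, m0, p0) (s, some l) = (false, l, s) := rfl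
      have h2 : stepM none (l, s) = some (l, s) := rfl
      rw [h1, h2, foldA_false]
      obtain ⟨c, hc⟩ := foldM_isSome (cands xs (s + 1)) (l, s)
      rw [hc]

-- head of a stable insertion: x takes the head iff it is strictly before the old head
theorem head_insertBy (lt : (Int × Int) → (Int × Int) → Bool) (x : Int × Int)
    (ys : List (Int × Int)) :
    (PySem.List.insertBy lt x ys).head? =
      (match ys.head? with
       | none => some x
       | some m => if lt x m then some x else some m) := by
  cases ys with
  | nil => rfl
  | cons y ys => simp only [PySem.List.insertBy]; split <;> simp_all

-- head of the insertion-sort fold is the strict-< running minimum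
theorem head_foldl_insertBy (lt : (Int × Int) → (Int × Int) → Bool)
    (cs : List (Int × Int)) : ∀ (acc : List (Int × Int)),
    (cs.foldl (fun a x => PySem.List.insertBy lt x a) acc).head? =
      cs.foldl (fun o x =>
        match o with
        | none => some x
        | some m => if lt x m then some x else some m) acc.head? := by
  induction cs with
  | nil => intro acc; rfl
  | cons c cs ih =>
    intro acc
    simp only [List.foldl_cons]
    rw [ih, head_insertBy]

theorem head_sorted_eq_foldM (cs : List (Int × Int)) :
    (PySem.List.sorted cs (fun c => c.1) false).head? = cs.foldl stepM none := by
  rw [PySem.List.sorted_eq_foldl_insertBy]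
  rw [head_foldl_insertBy (fun a b => decide (a.1 < b.1)) cs []]
  congr 1
  funext o x
  cases o <;> simp [stepM]

theorem minl_eq_alt (lista : List (Option Int)) : minl lista = minl_alt lista := by
  have hA : minl lista =
      (let st := (PySem.List.enumerate lista).foldl fA (true, 0, 0); (st.2.1, st.2.2)) := rfl
  have hB : minl_alt lista =
      (match (PySem.List.sorted (cands lista 0) (fun c => c.1) false).head? with
       | none => ((0 : Int), (0 : Int))
       | some c => c) := by
    show _ = _
    unfold minl_alt
    cases h : PySem.List.sorted (cands lista 0) (fun c => c.1) false <;>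
      simp [cands] at h ⊢ <;> rw [h]
  rw [hA, hB, head_sorted_eq_foldM, foldA_true]
  cases h : (cands lista 0).foldl stepM none <;> simp

-- ===== VERDICT (by name: the statement is the Claim_ definition above) =====
theorem minl_spec : Claim_equal_minl := fun lista _ => minl_eq_alt lista
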